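-- pv_equiv track=rewrite | github.com/Anmol-Singh-Jaggi/interview-notes | notes/algo-ds-practice/problems/backtracking/combinatorial/generate_subsequence_with_sum.py | generate_subseq_with_sum_iterator
-- ===== SOURCE A (Python) =====
-- def generate_subseq_with_sum_iterator(arr, sum):
--     if not arr and sum == 0:
--         yield []
--         return
--     if not arr:
--         yield None
--         return
--     # Include the last element
--     if sum >= arr[-1]:
--         including_last = generate_subseq_with_sum_iterator(
--             arr[: len(arr) - 1], sum - arr[-1]
--         )
--         if including_last is not None:
--             for seq in including_last:
--                 if seq is not None:
--                     yield seq + [arr[-1]]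
--     # Exclude the last element
--     excluding_last = generate_subseq_with_sum_iterator(arr[: len(arr) - 1], sum)
--     if excluding_last is not None:
--         for seq in excluding_last:
--             if seq is not None:
--                 yield seq
-- ===== SOURCE B (Python) =====
-- def generate_subseq_with_sum_iterator(arr, sum):
--     # Iterative DFS with an explicit stack of (index, remaining, chosen-suffix)
--     # frames; prepends chosen elements instead of slicing the array at each node.
--     n = len(arr)
--     out = []
--     stack = [(n, sum, [])]
--     while stack:
--         i, rem, chosen = stack.pop()
--         if i == 0:
--             if rem == 0:
--                 out.append(chosen)
--             continue
--         x = arr[i - 1]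
--         stack.append((i - 1, rem, chosen))          # exclude arr[i-1] (explored second)
--         if rem >= x:
--             stack.append((i - 1, rem - x, [x] + chosen))  # include arr[i-1] (explored first)
--     return out
-- ===== Notes on version B (the rewrite author's own statement) =====
-- stated objective: alternative
-- what changed: Replaces the recursive generator that copies an O(n) slice of the array at every node with an iterative explicit-stack DFS over indices that prepends chosen elements; it trades recursion and slicing for an explicit frame stack of (index, remaining, chosen) triples.
-- outside the precondition, e.g. on generate_subseq_with_sum_iterator([], 1): A returns [None], B returns []
import Mathlib
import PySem

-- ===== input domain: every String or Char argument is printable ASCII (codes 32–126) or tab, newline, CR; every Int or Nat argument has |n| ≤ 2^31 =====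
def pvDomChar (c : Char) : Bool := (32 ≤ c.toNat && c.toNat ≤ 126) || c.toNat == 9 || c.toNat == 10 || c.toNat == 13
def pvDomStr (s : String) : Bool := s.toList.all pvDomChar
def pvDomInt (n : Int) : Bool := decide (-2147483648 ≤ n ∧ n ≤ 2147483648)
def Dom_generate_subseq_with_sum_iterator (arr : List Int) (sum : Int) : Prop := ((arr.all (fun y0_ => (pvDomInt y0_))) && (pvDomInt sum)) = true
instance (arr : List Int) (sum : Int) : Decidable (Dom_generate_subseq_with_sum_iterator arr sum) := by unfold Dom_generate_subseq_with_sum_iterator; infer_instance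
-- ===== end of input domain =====

-- B replaces A's recursive generator (which slices the array at every node) by an
-- iterative explicit-stack DFS over indices that prepends chosen elements (no per-node
-- array slicing); same yielded sequences in the same order. A is a generator consumed as a list.

-- ===== PORT A =====
-- Literal transliteration of the generator: it yields Option values (None at the
-- empty-array/nonzero-sum base case), and both recursive consumers filter out None.
def pvCoreA (arr : List Int) (s : Int) : List (Option (List Int)) :=
  if h : arr = [] then
    (if s = 0 then [some []] else [none])
  else
    let last := arr.getLast h           -- arr[-1], exact: arr ≠ []
    let init := arr.dropLast            -- arr[: len(arr) - 1]
    (if s ≥ last then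
        -- for seq in including_last: if seq is not None: yield seq + [arr[-1]]
        ((pvCoreA init (s - last)).filterMap id).map (fun q => some (q ++ [last]))
      else [])
    ++ -- for seq in excluding_last: if seq is not None: yield seq
      ((pvCoreA init s).filterMap id).map some
termination_by arr.length
decreasing_by
  all_goals
    simp only [List.length_dropLast]
    exact Nat.sub_lt (List.length_pos_of_ne_nil h) (by norm_num)

-- The generator consumed as a list; a top-level None arises only outside Pre_
-- (arr = [] with sum ≠ 0), so filterMap id is the identity on admitted inputs.
def generate_subseq_with_sum_iterator (arr : List Int) (sum : Int) : List (List Int) :=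
  (pvCoreA arr sum).filterMap id

-- ===== PORT B =====
-- the while-stack loop of Source B; list head = top of stack
def pvLoopB (arr : List Int) (stack : List (Nat × Int × List Int)) (out : List (List Int)) :
    List (List Int) :=
  match stack with
  | [] => out
  | (i, rem, chosen) :: rest =>
    match i with
    | 0 => pvLoopB arr rest (if rem = 0 then out ++ [chosen] else out)
    | i' + 1 =>
      let x := arr.getD i' 0            -- arr[i-1], in range for the reachable frames
      if rem ≥ x then
        pvLoopB arr ((i', rem - x, x :: chosen) :: (i', rem, chosen) :: rest) out
      else
        pvLoopB arr ((i', rem, chosen) :: rest) out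
termination_by (stack.map (fun f => 3 ^ f.1)).sum
decreasing_by
  · simp only [List.map_cons, List.sum_cons]
    omega
  · simp only [List.map_cons, List.sum_cons, pow_succ]
    have h3 : 0 < 3 ^ i' := Nat.pow_pos (by norm_num)
    omega
  · simp only [List.map_cons, List.sum_cons, pow_succ]
    have h3 : 0 < 3 ^ i' := Nat.pow_pos (by norm_num)
    omega

def generate_subseq_with_sum_iterator_alt (arr : List Int) (sum : Int) : List (List Int) :=
  pvLoopB arr [(arr.length, sum, [])] []

-- ===== PRECONDITION & SPEC =====
-- Pre_ excludes exactly arr = [] with sum ≠ 0, where the Python generator yields the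
-- non-list value None (not a value of type List (List Int)); B returns [] there.
def Pre_generate_subseq_with_sum_iterator (arr : List Int) (sum : Int) : Prop :=
  arr ≠ [] ∨ sum = 0
instance (arr : List Int) (sum : Int) : Decidable (Pre_generate_subseq_with_sum_iterator arr sum) := by unfold Pre_generate_subseq_with_sum_iterator; infer_instance

def pvWitness_generate_subseq_with_sum_iterator : List Int × Int := ([1, 2, 3], 3)

def Spec_generate_subseq_with_sum_iterator (arr : List Int) (sum : Int) (out : List (List Int)) : Prop := out = generate_subseq_with_sum_iterator_alt arr sum
instance (arr : List Int) (sum : Int) (out : List (List Int)) : Decidable (Spec_generate_subseq_with_sum_iterator arr sum out) := by unfold Spec_generate_subseq_with_sum_iterator; infer_instance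

-- ===== CLAIM (what is proved, stated in full; the proofs are below) =====
def Claim_equal_generate_subseq_with_sum_iterator : Prop := ∀ (arr : List Int) (sum : Int), Dom_generate_subseq_with_sum_iterator arr sum → Pre_generate_subseq_with_sum_iterator arr sum → Spec_generate_subseq_with_sum_iterator arr sum (generate_subseq_with_sum_iterator arr sum)

-- ===== LEMMAS AND PROOFS =====

-- one unfolding of pvCoreA at a snoc
theorem pvCoreA_snoc (l : List Int) (x : Int) (s : Int) :
    pvCoreA (l ++ [x]) s =
      (if s ≥ x then ((pvCoreA l (s - x)).filterMap id).map (fun q => some (q ++ [x])) else [])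
      ++ ((pvCoreA l s).filterMap id).map some := by
  rw [pvCoreA]
  simp

-- processing one frame (i, rem, chosen) appends exactly the solutions of the first i
-- elements (with `chosen` appended to each) to the accumulated output
theorem pvLoopB_frame (arr : List Int) :
    ∀ (i : Nat), i ≤ arr.length → ∀ (rem : Int) (chosen : List Int)
      (rest : List (Nat × Int × List Int)) (out : List (List Int)),
      pvLoopB arr ((i, rem, chosen) :: rest) out =
        pvLoopB arr rest
          (out ++ ((pvCoreA (arr.take i) rem).filterMap id).map (fun q => q ++ chosen)) := by
  intro i
  induction i with
  | zero =>
    intro _ rem chosen rest out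
    rw [pvLoopB, pvCoreA]
    by_cases h : rem = 0 <;> simp [h]
  | succ i ih =>
    intro hle rem chosen rest out
    have hi : i < arr.length := Nat.lt_of_succ_le hle
    have hx : arr.take (i + 1) = arr.take i ++ [arr.getD i 0] := by
      rw [List.take_add_one]
      simp [List.getElem?_eq_getElem hi]
    rw [pvLoopB]
    
    rw [hx, pvCoreA_snoc]
    by_cases hc : rem ≥ arr.getD i 0
    · rw [if_pos hc, if_pos hc]
      rw [ih (Nat.le_of_lt hi), ih (Nat.le_of_lt hi)]
      simp [List.map_append, List.map_map, Function.comp_def, List.append_assoc]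
    · rw [if_neg hc, if_neg hc]
      rw [ih (Nat.le_of_lt hi)]
      simp

theorem ports_agree (arr : List Int) (sum : Int) :
    generate_subseq_with_sum_iterator arr sum = generate_subseq_with_sum_iterator_alt arr sum := by
  unfold generate_subseq_with_sum_iterator generate_subseq_with_sum_iterator_alt
  rw [pvLoopB_frame arr arr.length (Nat.le_refl _)]
  rw [pvLoopB]
  simp

-- ===== VERDICT (by name: the statement is the Claim_ definition above) =====
theorem generate_subseq_with_sum_iterator_spec : Claim_equal_generate_subseq_with_sum_iterator := by
  intro arr sum _ _
  unfold Spec_generate_subseq_with_sum_iterator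
  exact ports_agree arr sum
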